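-- pv_equiv track=rewrite | github.com/aaronGeb/competitive-programming | 07-Feb-2025/Same Differences 249986.py | same_differences
-- ===== SOURCE A (Python) =====
-- from collections import defaultdict
--
-- def same_differences(t, test_cases):
--     results = []
--
--     for case in test_cases:
--         n, a = case
--         diff_count = defaultdict(int)
--         total_pairs = 0
--
--         for i in range(n):
--             diff = a[i] - (i + 1)
--             total_pairs += diff_count[diff]
--             diff_count[diff] += 1
--
--         results.append(total_pairs)
--
--     return results
-- ===== SOURCE B (Python) =====
-- from collections import defaultdict
--
-- def same_differences(t, test_cases):
--     results = []
--     for case in test_cases: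
--         n, a = case
--         diffs = [a[i] - (i + 1) for i in range(n)]
--         counts = defaultdict(int)
--         for d in diffs:
--             counts[d] += 1
--         results.append(sum(c * (c - 1) // 2 for c in counts.values()))
--     return results
-- ===== Notes on version B (the rewrite author's own statement) =====
-- stated objective: alternative
-- what changed: Replaces the interleaved running-count accumulation with a two-phase decomposition: build the full list of diffs, count them into a histogram, then sum k*(k-1)//2 over the counts (closed-form pair count per group).
import Mathlib
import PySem

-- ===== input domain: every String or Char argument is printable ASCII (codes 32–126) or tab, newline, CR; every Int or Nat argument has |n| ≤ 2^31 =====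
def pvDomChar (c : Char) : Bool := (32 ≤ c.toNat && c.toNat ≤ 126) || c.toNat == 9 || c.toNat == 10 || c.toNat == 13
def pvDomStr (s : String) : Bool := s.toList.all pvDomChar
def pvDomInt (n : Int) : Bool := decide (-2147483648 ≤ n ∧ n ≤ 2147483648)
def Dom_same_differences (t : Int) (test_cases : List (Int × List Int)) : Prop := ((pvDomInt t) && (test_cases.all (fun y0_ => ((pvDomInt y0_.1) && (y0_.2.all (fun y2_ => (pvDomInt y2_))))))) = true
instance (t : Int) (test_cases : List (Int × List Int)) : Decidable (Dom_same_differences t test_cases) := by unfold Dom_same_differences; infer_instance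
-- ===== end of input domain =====

-- B counts pairs per case by building the diff list, taking its histogram, and summing c*(c-1)//2
-- over the counts, instead of A's interleaved running-count accumulation; same cost, different decomposition.

-- ===== PORT A =====
def same_differences (t : Int) (test_cases : List (Int × List Int)) : List Int :=
  test_cases.foldl (fun results case =>
    let n := case.1
    let a := case.2
    let st := (PySem.List.pyRange 0 n 1).foldl
      (fun (st : PySem.Dict Int Int × Int) i =>
        let diff := PySem.List.pyGetD a i 0 - (i + 1)
        (st.1.modify diff 0 (· + 1), st.2 + st.1.getD diff 0))
      (PySem.Dict.empty, 0)
    results ++ [st.2]) []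

-- ===== PORT B =====
def same_differences_alt (t : Int) (test_cases : List (Int × List Int)) : List Int :=
  test_cases.foldl (fun results case =>
    let n := case.1
    let a := case.2
    let diffs := (PySem.List.pyRange 0 n 1).map (fun i => PySem.List.pyGetD a i 0 - (i + 1))
    let counts := diffs.foldl (fun d x => d.modify x 0 (· + 1)) (PySem.Dict.empty : PySem.Dict Int Int)
    results ++ [(counts.values.map (fun c => PySem.Int.floordiv (c * (c - 1)) 2)).foldl (· + ·) 0]) []

-- ===== PRECONDITION & SPEC =====
-- Pre_ excludes exactly the cases where Python A raises IndexError: a case with 0 < n and n > len(a).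
def Pre_same_differences (t : Int) (test_cases : List (Int × List Int)) : Prop :=
  ∀ case ∈ test_cases, case.1 ≤ (case.2.length : Int) ∨ case.1 ≤ 0
instance (t : Int) (test_cases : List (Int × List Int)) : Decidable (Pre_same_differences t test_cases) := by unfold Pre_same_differences; infer_instance
def pvWitness_same_differences : Int × (List (Int × List Int)) := (1, [(2, [3, 1]), (3, [2, 3, 4])])

def Spec_same_differences (t : Int) (test_cases : List (Int × List Int)) (out : List Int) : Prop := out = same_differences_alt t test_cases
instance (t : Int) (test_cases : List (Int × List Int)) (out : List Int) : Decidable (Spec_same_differences t test_cases out) := by unfold Spec_same_differences; infer_instance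

-- ===== CLAIM (what is proved, stated in full; the proofs are below) =====
def Claim_equal_same_differences : Prop := ∀ (t : Int) (test_cases : List (Int × List Int)), Dom_same_differences t test_cases → Pre_same_differences t test_cases → Spec_same_differences t test_cases (same_differences t test_cases)

-- ===== LEMMAS AND PROOFS =====

def pvC2 (c : Int) : Int := PySem.Int.floordiv (c * (c - 1)) 2

theorem pvC2_succ (c : Int) : pvC2 (c + 1) = pvC2 c + c := by
  have he : Even (c * (c - 1)) := by
    have := Int.even_mul_succ_self (c - 1)
    simpa [mul_comm] using this
  obtain ⟨m, hm⟩ := he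
  have h1 : c * (c - 1) = 2 * m := by omega
  have h2 : (c + 1) * (c + 1 - 1) = 2 * (m + c) := by nlinarith [hm]
  unfold pvC2
  rw [h1, h2]
  simp [PySem.Int.floordiv, Int.mul_fdiv_cancel_left]

theorem pv_fst_run (ds : List Int) (d : PySem.Dict Int Int) (t : Int) :
    (ds.foldl (fun st x => (st.1.modify x 0 (· + 1), st.2 + st.1.getD x 0)) (d, t)).1
      = ds.foldl (fun d x => d.modify x 0 (· + 1)) d := by
  induction ds generalizing d t with
  | nil => rfl
  | cons a l ih => simpa using ih _ _

theorem pv_sum_map_update (l : List Int) (hl : l.Nodup) (x : Int) (hx : x ∈ l)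
    (f g : Int → Int) (h : ∀ k ∈ l, k ≠ x → f k = g k) :
    (l.map f).sum = (l.map g).sum + (f x - g x) := by
  induction l with
  | nil => cases hx
  | cons a l ih =>
    rcases List.mem_cons.mp hx with rfl | hx'
    · have hnx : x ∉ l := (List.nodup_cons.mp hl).1
      have : l.map f = l.map g := List.map_congr_left (fun k hk => h k (List.mem_cons_of_mem _ hk) (fun e => hnx (e ▸ hk)))
      simp [this]; ring
    · have ha : a ≠ x := fun e => (List.nodup_cons.mp hl).1 (e ▸ hx')
      have := ih (List.nodup_cons.mp hl).2 hx' (fun k hk hkx => h k (List.mem_cons_of_mem _ hk) hkx)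
      simp [h a (List.mem_cons_self) ha, this]; ring

theorem pv_main (ds : List Int) :
    (ds.foldl (fun st x => (st.1.modify x 0 (· + 1), st.2 + st.1.getD x 0))
        ((PySem.Dict.empty : PySem.Dict Int Int), (0 : Int))).2
      = ((PySem.Set.ofList ds).map (fun k => pvC2 ((ds.count k : Int)))).sum := by
  induction ds using List.reverseRecOn with
  | nil => simp [PySem.Set.ofList]
  | append_singleton ds x ih =>
    rw [List.foldl_append]
    have hfst := pv_fst_run ds PySem.Dict.empty 0
    have hcnt : (ds.foldl (fun d x => d.modify x 0 (· + 1)) PySem.Dict.empty) = PySem.Dict.counter ds :=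
      (PySem.Dict.counter_eq_foldl ds).symm
    simp only [List.foldl_cons, List.foldl_nil]
    rw [hfst, hcnt, ih, PySem.Dict.getD_counter, PySem.Set.ofList_append_singleton]
    by_cases hx : x ∈ PySem.Set.ofList ds
    · rw [PySem.Set.add_of_mem hx]
      have hxds : x ∈ ds := (PySem.Set.mem_ofList ds x).mp hx
      have hsum := pv_sum_map_update (PySem.Set.ofList ds) (PySem.Set.nodup_ofList ds) x hx
        (fun k => pvC2 (((ds ++ [x]).count k : Int))) (fun k => pvC2 ((ds.count k : Int)))
        (fun k _ hkx => by simp [List.count_append, Ne.symm hkx])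
      rw [hsum]
      beta_reduce
      have hcx : ((ds ++ [x]).count x : Int) = (ds.count x : Int) + 1 := by
        simp [List.count_append]
      rw [hcx, pvC2_succ]; ring
    · rw [PySem.Set.add_of_not_mem hx]
      have hxds : x ∉ ds := fun h => hx ((PySem.Set.mem_ofList ds x).mpr h)
      have hmap : (PySem.Set.ofList ds).map (fun k => pvC2 (((ds ++ [x]).count k : Int)))
          = (PySem.Set.ofList ds).map (fun k => pvC2 ((ds.count k : Int))) := by
        apply List.map_congr_left
        intro k hk
        have : k ≠ x := fun e => hxds (e ▸ (PySem.Set.mem_ofList ds k).mp hk)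
        simp [List.count_append, Ne.symm this]
      have hc0 : ds.count x = 0 := List.count_eq_zero.mpr hxds
      rw [List.map_append, List.map_singleton, List.sum_append, hmap]
      have h1 : (ds ++ [x]).count x = 1 := by simp [List.count_append, hc0]
      simp [h1, hc0, pvC2, PySem.Int.floordiv]

theorem pv_case (n : Int) (a : List Int) :
    ((PySem.List.pyRange 0 n 1).foldl
      (fun (st : PySem.Dict Int Int × Int) i =>
        let diff := PySem.List.pyGetD a i 0 - (i + 1)
        (st.1.modify diff 0 (· + 1), st.2 + st.1.getD diff 0))
      (PySem.Dict.empty, 0)).2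
    = ((((PySem.List.pyRange 0 n 1).map (fun i => PySem.List.pyGetD a i 0 - (i + 1))).foldl
        (fun d x => d.modify x 0 (· + 1)) (PySem.Dict.empty : PySem.Dict Int Int)).values.map
        (fun c => PySem.Int.floordiv (c * (c - 1)) 2)).foldl (· + ·) 0 := by
  have hA : (((PySem.List.pyRange 0 n 1).map (fun i => PySem.List.pyGetD a i 0 - (i + 1))).foldl
      (fun (st : PySem.Dict Int Int × Int) x =>
        (st.1.modify x 0 (· + 1), st.2 + st.1.getD x 0))
      (PySem.Dict.empty, 0))
    = ((PySem.List.pyRange 0 n 1).foldl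
      (fun (st : PySem.Dict Int Int × Int) i =>
        let diff := PySem.List.pyGetD a i 0 - (i + 1)
        (st.1.modify diff 0 (· + 1), st.2 + st.1.getD diff 0))
      (PySem.Dict.empty, 0)) := by rw [List.foldl_map]
  rw [← hA, pv_main]
  have hcnt : (((PySem.List.pyRange 0 n 1).map (fun i => PySem.List.pyGetD a i 0 - (i + 1))).foldl
      (fun d x => d.modify x 0 (· + 1)) (PySem.Dict.empty : PySem.Dict Int Int))
      = PySem.Dict.counter ((PySem.List.pyRange 0 n 1).map (fun i => PySem.List.pyGetD a i 0 - (i + 1))) :=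
    (PySem.Dict.counter_eq_foldl _).symm
  rw [hcnt]
  rw [show ((PySem.Dict.counter ((PySem.List.pyRange 0 n 1).map (fun i => PySem.List.pyGetD a i 0 - (i + 1)))).values)
      = ((PySem.Dict.counter ((PySem.List.pyRange 0 n 1).map (fun i => PySem.List.pyGetD a i 0 - (i + 1)))).items.map (·.2)) from rfl]
  rw [PySem.Dict.items_counter]
  rw [List.map_map, List.map_map]
  rw [← List.sum_eq_foldl]
  rfl

theorem pv_fold (tcs : List (Int × List Int)) (acc : List Int) :
    tcs.foldl (fun results case =>
      let n := case.1
      let a := case.2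
      let st := (PySem.List.pyRange 0 n 1).foldl
        (fun (st : PySem.Dict Int Int × Int) i =>
          let diff := PySem.List.pyGetD a i 0 - (i + 1)
          (st.1.modify diff 0 (· + 1), st.2 + st.1.getD diff 0))
        (PySem.Dict.empty, 0)
      results ++ [st.2]) acc
    = tcs.foldl (fun results case =>
      let n := case.1
      let a := case.2
      let diffs := (PySem.List.pyRange 0 n 1).map (fun i => PySem.List.pyGetD a i 0 - (i + 1))
      let counts := diffs.foldl (fun d x => d.modify x 0 (· + 1)) (PySem.Dict.empty : PySem.Dict Int Int)
      results ++ [(counts.values.map (fun c => PySem.Int.floordiv (c * (c - 1)) 2)).foldl (· + ·) 0]) acc := by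
  induction tcs generalizing acc with
  | nil => rfl
  | cons c l ih =>
    simp only [List.foldl_cons]
    rw [pv_case c.1 c.2]
    exact ih _

-- ===== VERDICT (by name: the statement is the Claim_ definition above) =====
theorem same_differences_spec : Claim_equal_same_differences := by
  intro t tcs _ _
  show same_differences t tcs = same_differences_alt t tcs
  unfold same_differences same_differences_alt
  exact pv_fold tcs []
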